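-- pv_equiv track=rewrite | github.com/x-b-e/xbe-cli | build_tools/compile.py | shortest_paths
-- ===== SOURCE A (Python) =====
-- def shortest_paths(
--     adjacency: dict[str, list[tuple[str, str]]], start: str, max_hops: int
-- ) -> dict[str, list[str]]:
--     paths: dict[str, list[str]] = {start: []}
--     queue: list[str] = [start]
--     while queue:
--         current = queue.pop(0)
--         path = paths[current]
--         if len(path) >= max_hops:
--             continue
--         for rel_name, target in adjacency.get(current, []):
--             if target in paths:
--                 continue
--             paths[target] = path + [rel_name]
--             queue.append(target)
--     return paths
-- ===== SOURCE B (Python) =====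
-- def shortest_paths(
--     adjacency: dict[str, list[tuple[str, str]]], start: str, max_hops: int
-- ) -> dict[str, list[str]]:
--     # Parent-pointer BFS: store one (parent, rel) edge per node, reconstruct paths at the end.
--     pred: dict[str, tuple[str, str] | None] = {start: None}
--     frontier: list[str] = [start]
--     for _ in range(max_hops):
--         if not frontier:
--             break
--         next_frontier: list[str] = []
--         for current in frontier:
--             for rel_name, target in adjacency.get(current, []):
--                 if target not in pred:
--                     pred[target] = (current, rel_name)
--                     next_frontier.append(target)
--         frontier = next_frontier
--     result: dict[str, list[str]] = {}
--     for node in pred: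
--         rels: list[str] = []
--         cur = node
--         while pred[cur] is not None:
--             parent, rel = pred[cur]
--             rels.append(rel)
--             cur = parent
--         result[node] = rels[::-1]
--     return result
-- ===== Notes on version B (the rewrite author's own statement) =====
-- stated objective: alternative
-- what changed: Replaces A's path-copying FIFO BFS (pop(0) queue, full relation-path stored per node) by a parent-pointer BFS: a level-synchronous frontier loop stores one (parent, rel) edge per node, and a final pass reconstructs each path by walking predecessor pointers back to the start.
import Mathlib
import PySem

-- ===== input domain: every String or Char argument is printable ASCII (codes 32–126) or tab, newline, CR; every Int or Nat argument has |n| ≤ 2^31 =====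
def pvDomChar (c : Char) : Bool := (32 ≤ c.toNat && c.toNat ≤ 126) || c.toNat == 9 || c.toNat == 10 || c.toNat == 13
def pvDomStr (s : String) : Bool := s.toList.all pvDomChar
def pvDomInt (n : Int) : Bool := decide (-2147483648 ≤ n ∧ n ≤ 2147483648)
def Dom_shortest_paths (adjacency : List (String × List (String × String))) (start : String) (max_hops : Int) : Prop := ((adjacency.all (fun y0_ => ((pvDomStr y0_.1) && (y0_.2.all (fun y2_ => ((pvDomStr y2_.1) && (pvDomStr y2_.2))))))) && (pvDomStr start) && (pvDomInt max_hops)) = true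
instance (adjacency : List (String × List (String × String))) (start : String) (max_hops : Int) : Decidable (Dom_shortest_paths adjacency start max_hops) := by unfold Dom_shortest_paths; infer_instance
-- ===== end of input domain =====

-- B replaces A's path-copying FIFO BFS by a parent-pointer BFS (one (parent, rel) edge stored
-- per node, level-synchronous frontier loop) with a final path-reconstruction pass; same dict.

-- ===== PORT A =====

-- the inner `for rel_name, target in adjacency.get(current, [])` loop of A
def innerA (paths : PySem.Dict String (List String)) (queue : List String)
    (path : List String) : List (String × String) →
    PySem.Dict String (List String) × List String
  | [] => (paths, queue)
  | (rel, tgt) :: rest =>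
    if paths.contains tgt then innerA paths queue path rest
    else innerA (paths.insert tgt (path ++ [rel])) (queue ++ [tgt]) path rest

-- termination measure for A's while loop: pairs of the adjacency whose target is not yet a key
def pendA (adj : PySem.Dict String (List (String × String)))
    (paths : PySem.Dict String (List String)) : Nat :=
  ((adj.items.flatMap (·.2)).filter (fun p => !paths.contains p.2)).length

lemma pend_insert_lt (adj : PySem.Dict String (List (String × String)))
    (paths : PySem.Dict String (List String)) (rel tgt : String) (v : List String)
    (hmem : (rel, tgt) ∈ adj.items.flatMap (·.2)) (h : paths.contains tgt = false) :
    pendA adj (paths.insert tgt v) < pendA adj paths := by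
  unfold pendA
  simp only [← List.countP_eq_length_filter]
  obtain ⟨l1, l2, heq⟩ := List.append_of_mem hmem
  rw [heq]
  have hb : (!paths.contains tgt) = true := by simp [h]
  have h1 := List.countP_mono_left (l := l1)
    (p := fun p => !(paths.insert tgt v).contains p.2) (q := fun p => !paths.contains p.2)
    (fun a _ ha => by
      simp only [PySem.Dict.contains_insert, Bool.not_eq_eq_eq_not, Bool.not_true,
        Bool.or_eq_false_iff] at ha ⊢
      exact ha.2)
  have h2 := List.countP_mono_left (l := l2)
    (p := fun p => !(paths.insert tgt v).contains p.2) (q := fun p => !paths.contains p.2)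
    (fun a _ ha => by
      simp only [PySem.Dict.contains_insert, Bool.not_eq_eq_eq_not, Bool.not_true,
        Bool.or_eq_false_iff] at ha ⊢
      exact ha.2)
  simp [List.countP_append, hb]
  omega

lemma mem_flat_of_mem_getD (adj : PySem.Dict String (List (String × String)))
    (k : String) (e : String × String) (h : e ∈ adj.getD k []) :
    e ∈ adj.items.flatMap (·.2) := by
  rcases hv : adj.get? k with _ | v
  · simp [PySem.Dict.getD_eq_get?_getD, hv] at h
  · rw [PySem.Dict.getD_eq_get?_getD, hv] at h
    exact List.mem_flatMap.2 ⟨(k, v), PySem.Dict.mem_items_of_get?_eq_some _ hv, h⟩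

lemma innerA_measure (adj : PySem.Dict String (List (String × String)))
    (path : List String) :
    ∀ (entries : List (String × String)) (paths : PySem.Dict String (List String))
      (queue : List String), (∀ e ∈ entries, e ∈ adj.items.flatMap (·.2)) →
    2 * pendA adj (innerA paths queue path entries).1
      + (innerA paths queue path entries).2.length
      ≤ 2 * pendA adj paths + queue.length := by
  intro entries
  induction entries with
  | nil => intro paths queue _; simp [innerA]
  | cons e rest ih =>
    intro paths queue hmem
    obtain ⟨rel, tgt⟩ := e
    by_cases hc : paths.contains tgt
    · simpa [innerA, hc] using ih paths queue (fun e he => hmem e (by simp [he]))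
    · simp only [innerA, hc, if_false, Bool.false_eq_true]
      have hlt := pend_insert_lt adj paths rel tgt (paths.getD tgt [] ++ [rel])
        (hmem (rel, tgt) (by simp)) (by simpa using hc)
      have hlt' := pend_insert_lt adj paths rel tgt (path ++ [rel])
        (hmem (rel, tgt) (by simp)) (by simpa using hc)
      have := ih (paths.insert tgt (path ++ [rel])) (queue ++ [tgt])
        (fun e he => hmem e (by simp [he]))
      simp only [List.length_append, List.length_cons, List.length_nil] at this ⊢
      omega

-- A's while loop
def runA (adj : PySem.Dict String (List (String × String))) (mh : Int) :
    PySem.Dict String (List String) → List String → PySem.Dict String (List String)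
  | paths, [] => paths
  | paths, current :: rest =>
    -- Python `paths[current]`: current is always a key on reachable states, so getD is exact there
    let path := paths.getD current []
    if mh ≤ (path.length : Int) then runA adj mh paths rest
    else
      let st := innerA paths rest path (adj.getD current [])
      runA adj mh st.1 st.2
termination_by paths queue => 2 * pendA adj paths + queue.length
decreasing_by
  · simp only [List.length_cons]; omega
  · have := innerA_measure adj (paths.getD current []) (adj.getD current []) paths rest
      (fun e he => mem_flat_of_mem_getD adj current e he)
    simp only [List.length_cons]; omega

def shortest_paths (adjacency : List (String × List (String × String))) (start : String) (max_hops : Int) : List (String × List String) :=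
  (runA (PySem.Dict.ofList adjacency) max_hops
    ((PySem.Dict.empty).insert start []) [start]).items

-- ===== PORT B =====

-- one step of B's inner `for rel_name, target in adjacency.get(current, [])`
def stepP (current : String)
    (st : PySem.Dict String (Option (String × String)) × List String)
    (e : String × String) :
    PySem.Dict String (Option (String × String)) × List String :=
  if st.1.contains e.2 then st
  else (st.1.insert e.2 (some (current, e.1)), st.2 ++ [e.2])

-- one level: scan the frontier, accumulating (pred, next_frontier)
def levelP (adj : PySem.Dict String (List (String × String)))
    (st : PySem.Dict String (Option (String × String)) × List String)
    (frontier : List String) :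
    PySem.Dict String (Option (String × String)) × List String :=
  frontier.foldl (fun st current => (adj.getD current []).foldl (stepP current) st) st

-- B's `for _ in range(max_hops)` loop with the empty-frontier break
def loopP (adj : PySem.Dict String (List (String × String)))
    (pred : PySem.Dict String (Option (String × String))) (frontier : List String) :
    Nat → PySem.Dict String (Option (String × String))
  | 0 => pred
  | k + 1 =>
    if frontier.isEmpty then pred
    else
      let st := levelP adj (pred, []) frontier
      loopP adj st.1 st.2 k

-- B's `while pred[cur] is not None` reconstruction walk; fuel (number of keys of pred) only
-- totalizes the loop — on every reachable pred the chain is shorter than the key count.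
-- `pred[cur]`: cur is always a key on reachable states, so getD is exact there.
def rebuild (pred : PySem.Dict String (Option (String × String))) :
    Nat → String → List String → List String
  | 0, _, rels => rels.reverse
  | f + 1, cur, rels =>
    match pred.getD cur none with
    | none => rels.reverse
    | some (parent, rel) => rebuild pred f parent (rels ++ [rel])

def shortest_paths_alt (adjacency : List (String × List (String × String))) (start : String) (max_hops : Int) : List (String × List String) :=
  let pred := loopP (PySem.Dict.ofList adjacency)
    ((PySem.Dict.empty).insert start none) [start] max_hops.toNat
  -- `result[node] = …` over pred's keys: the keys are distinct, so the result dict's items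
  -- are exactly this map in key order
  pred.items.map (fun kv => (kv.1, rebuild pred pred.items.length kv.1 []))

-- ===== PRECONDITION & SPEC =====
def Spec_shortest_paths (adjacency : List (String × List (String × String))) (start : String) (max_hops : Int) (out : List (String × List String)) : Prop := out = shortest_paths_alt adjacency start max_hops
instance (adjacency : List (String × List (String × String))) (start : String) (max_hops : Int) (out : List (String × List String)) : Decidable (Spec_shortest_paths adjacency start max_hops out) := by unfold Spec_shortest_paths; infer_instance

-- ===== CLAIM (what is proved, stated in full; the proofs are below) =====
def Claim_equal_shortest_paths : Prop := ∀ (adjacency : List (String × List (String × String))) (start : String) (max_hops : Int), Dom_shortest_paths adjacency start max_hops → Spec_shortest_paths adjacency start max_hops (shortest_paths adjacency start max_hops)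

-- ===== LEMMAS AND PROOFS =====
-- (proof-only intermediate: A's FIFO loop = a level-synchronous loop carrying full paths,
--  then that loop is coupled with B's parent-pointer loop)

def stepB (path : List String) (st : PySem.Dict String (List String) × List String)
    (e : String × String) : PySem.Dict String (List String) × List String :=
  if st.1.contains e.2 then st
  else (st.1.insert e.2 (path ++ [e.1]), st.2 ++ [e.2])

def levelB (adj : PySem.Dict String (List (String × String)))
    (st : PySem.Dict String (List String) × List String) (frontier : List String) :
    PySem.Dict String (List String) × List String :=
  frontier.foldl (fun st current =>
    (adj.getD current []).foldl (stepB (st.1.getD current [])) st) st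

def loopB (adj : PySem.Dict String (List (String × String)))
    (paths : PySem.Dict String (List String)) (frontier : List String) :
    Nat → PySem.Dict String (List String)
  | 0 => paths
  | k + 1 =>
    if frontier.isEmpty then paths
    else
      let st := levelB adj (paths, []) frontier
      loopB adj st.1 st.2 k

-- every node of F is a key of `paths` with a path of length ℓ
def Front (ℓ : Nat) (paths : PySem.Dict String (List String)) (F : List String) : Prop :=
  ∀ f ∈ F, ∃ p, paths.get? f = some p ∧ p.length = ℓ

-- the inner fold preserves existing keys' values
lemma foldStepB_get?_pres (path : List String) :
    ∀ (entries : List (String × String)) (st : _) (k : String),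
    (st.1.get? k).isSome →
    (entries.foldl (stepB path) st).1.get? k = st.1.get? k := by
  intro entries
  induction entries with
  | nil => intro st k _; rfl
  | cons e rest ih =>
    intro st k hk
    by_cases hc : st.1.contains e.2
    · simpa [stepB, hc] using ih st k hk
    · have hne : k ≠ e.2 := by
        intro h
        rw [h, ← PySem.Dict.contains_eq_isSome_get?] at hk
        exact hc hk
      have hpres : (st.1.insert e.2 (path ++ [e.1])).get? k = st.1.get? k :=
        PySem.Dict.get?_insert_of_ne _ _ hne
      simp only [List.foldl_cons, stepB, hc, if_false, Bool.false_eq_true]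
      rw [ih _ k (by rw [hpres]; exact hk)]
      exact hpres

-- the inner fold keeps the accumulated-frontier property
lemma foldStepB_front (path : List String) (L : Nat) (hL : path.length + 1 = L) :
    ∀ (entries : List (String × String)) (st : _),
    (∀ n ∈ st.2, ∃ p, st.1.get? n = some p ∧ p.length = L) →
    ∀ n ∈ (entries.foldl (stepB path) st).2,
      ∃ p, (entries.foldl (stepB path) st).1.get? n = some p ∧ p.length = L := by
  intro entries
  induction entries with
  | nil => intro st h n hn; exact h n hn
  | cons e rest ih =>
    intro st h n hn
    by_cases hc : st.1.contains e.2
    · simp only [List.foldl_cons, stepB, hc, if_true] at hn ⊢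
      exact ih st h n hn
    · simp only [List.foldl_cons, stepB, hc, if_false, Bool.false_eq_true] at hn ⊢
      refine ih _ ?_ n hn
      intro m hm
      rcases List.mem_append.1 hm with hm | hm
      · obtain ⟨p, hp, hl⟩ := h m hm
        have hne : m ≠ e.2 := by
          intro hEq
          apply hc
          rw [PySem.Dict.contains_eq_isSome_get?, ← hEq, hp]
          rfl
        exact ⟨p, by rw [PySem.Dict.get?_insert_of_ne _ _ hne]; exact hp, hl⟩
      · rw [List.mem_singleton] at hm
        subst hm
        exact ⟨path ++ [e.1], PySem.Dict.get?_insert_self _ _ _, by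
          simpa using hL⟩

-- a level pass over a level-ℓ frontier yields a level-(ℓ+1) frontier
lemma levelB_front (adj : PySem.Dict String (List (String × String))) (ℓ : Nat) :
    ∀ (F : List String) (st : _),
    Front ℓ st.1 F →
    (∀ n ∈ st.2, ∃ p, st.1.get? n = some p ∧ p.length = ℓ + 1) →
    ∀ n ∈ (levelB adj st F).2,
      ∃ p, (levelB adj st F).1.get? n = some p ∧ p.length = ℓ + 1 := by
  intro F
  induction F with
  | nil => intro st _ h n hn; exact h n hn
  | cons f F' ih =>
    intro st hF h n hn
    obtain ⟨p, hp, hl⟩ := hF f (by simp)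
    have hpath : st.1.getD f [] = p := by
      rw [PySem.Dict.getD_eq_get?_getD, hp]; rfl
    have hstep : levelB adj st (f :: F')
        = levelB adj ((adj.getD f []).foldl (stepB (st.1.getD f [])) st) F' := rfl
    rw [hstep] at hn ⊢
    refine ih _ ?_ ?_ n hn
    · intro f' hf'
      obtain ⟨p', hp', hl'⟩ := hF f' (by simp [hf'])
      exact ⟨p', by
        rw [foldStepB_get?_pres _ _ _ f' (by rw [hp']; rfl)]; exact hp', hl'⟩
    · exact foldStepB_front (st.1.getD f []) (ℓ + 1)
        (by rw [hpath, hl]) (adj.getD f []) st h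

-- A's inner loop is the level pass's inner fold with the queue split off
lemma innerA_eq_foldStepB (path : List String) :
    ∀ (entries : List (String × String)) (paths : _) (q acc : List String),
    innerA paths (q ++ acc) path entries
      = ((entries.foldl (stepB path) (paths, acc)).1,
         q ++ (entries.foldl (stepB path) (paths, acc)).2) := by
  intro entries
  induction entries with
  | nil => intro paths q acc; simp [innerA]
  | cons e rest ih =>
    intro paths q acc
    obtain ⟨rel, tgt⟩ := e
    by_cases hc : paths.contains tgt
    · simpa [innerA, stepB, hc] using ih paths q acc
    · simp only [innerA, stepB, hc, if_false, Bool.false_eq_true, List.foldl_cons]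
      rw [List.append_assoc]
      exact ih _ q (acc ++ [tgt])

-- a saturated frontier (ℓ ≥ mh) is drained without effect
lemma runA_saturated (adj : PySem.Dict String (List (String × String))) (mh : Int)
    (ℓ : Nat) (hℓ : mh ≤ (ℓ : Int)) :
    ∀ (F : List String) (paths : _), Front ℓ paths F →
    runA adj mh paths F = paths := by
  intro F
  induction F with
  | nil => intro paths _; simp [runA]
  | cons f F' ih =>
    intro paths hF
    obtain ⟨p, hp, hl⟩ := hF f (by simp)
    have hpath : paths.getD f [] = p := by
      rw [PySem.Dict.getD_eq_get?_getD, hp]; rfl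
    rw [runA]
    simp only [hpath, hl]
    rw [if_pos hℓ]
    exact ih paths (fun f' hf' => hF f' (by simp [hf']))

-- sweeping one level of A's queue equals the level pass
lemma runA_sweep (adj : PySem.Dict String (List (String × String))) (mh : Int)
    (ℓ : Nat) (hℓ : (ℓ : Int) < mh) :
    ∀ (F : List String) (paths : _) (N acc : List String), Front ℓ paths F →
    runA adj mh paths (F ++ (N ++ acc))
      = runA adj mh (levelB adj (paths, acc) F).1
          (N ++ (levelB adj (paths, acc) F).2) := by
  intro F
  induction F with
  | nil => intro paths N acc _; simp [levelB]
  | cons f F' ih =>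
    intro paths N acc hF
    obtain ⟨p, hp, hl⟩ := hF f (by simp)
    have hpath : paths.getD f [] = p := by
      rw [PySem.Dict.getD_eq_get?_getD, hp]; rfl
    rw [List.cons_append, runA]
    have hnot : ¬ mh ≤ ((paths.getD f []).length : Int) := by
      rw [hpath, hl]; omega
    rw [if_neg hnot]
    have hsplit : F' ++ (N ++ acc) = (F' ++ N) ++ acc := by
      rw [List.append_assoc]
    rw [hsplit, innerA_eq_foldStepB]
    set fold := (adj.getD f []).foldl (stepB (paths.getD f [])) (paths, acc) with hfold
    have hq : (F' ++ N) ++ fold.2 = F' ++ (N ++ fold.2) := by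
      rw [List.append_assoc]
    rw [hq]
    have hF' : Front ℓ fold.1 F' := by
      intro f' hf'
      obtain ⟨p', hp', hl'⟩ := hF f' (by simp [hf'])
      exact ⟨p', by
        rw [hfold, foldStepB_get?_pres _ _ _ f' (by rw [hp']; rfl)]; exact hp', hl'⟩
    have := ih fold.1 N fold.2 hF'
    rw [this]
    rfl

lemma runA_eq_loopB (adj : PySem.Dict String (List (String × String))) (mh : Int) :
    ∀ (k ℓ : Nat) (F : List String) (paths : _),
    Front ℓ paths F → (mh - (ℓ : Int)).toNat = k →
    runA adj mh paths F = loopB adj paths F k := by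
  intro k
  induction k with
  | zero =>
    intro ℓ F paths hF hk
    have hℓ : mh ≤ (ℓ : Int) := by omega
    rw [runA_saturated adj mh ℓ hℓ F paths hF]
    rfl
  | succ k ih =>
    intro ℓ F paths hF hk
    have hℓ : (ℓ : Int) < mh := by omega
    rcases F with _ | ⟨f, F'⟩
    · simp [runA, loopB]
    · rw [loopB]
      rw [if_neg (by simp)]
      have hsweep := runA_sweep adj mh ℓ hℓ (f :: F') paths [] [] hF
      simp only [List.append_nil, List.nil_append] at hsweep
      rw [hsweep]
      refine ih (ℓ + 1) _ _ ?_ ?_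
      · intro n hn
        have := levelB_front adj ℓ (f :: F') (paths, []) hF (by simp) n hn
        simpa using this
      · omega

-- ===== coupling of the full-path loop with B's parent-pointer loop =====

-- the reversed relation chain pred encodes above `cur`
def ChainRev (pred : PySem.Dict String (Option (String × String))) :
    String → List String → Prop
  | cur, [] => pred.get? cur = some none
  | cur, rel :: rest => ∃ parent, pred.get? cur = some (some (parent, rel)) ∧
      ChainRev pred parent rest

lemma chainRev_insert (pred : PySem.Dict String (Option (String × String)))
    (k : String) (v : Option (String × String)) (hk : pred.contains k = false) :
    ∀ (l : List String) (cur : String), ChainRev pred cur l →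
    ChainRev (pred.insert k v) cur l := by
  intro l
  induction l with
  | nil =>
    intro cur h
    have hne : cur ≠ k := by
      intro hEq
      rw [PySem.Dict.contains_eq_isSome_get?, ← hEq, h] at hk
      simp at hk
    exact (PySem.Dict.get?_insert_of_ne _ _ hne).trans h
  | cons rel rest ih =>
    intro cur h
    obtain ⟨parent, hp, hrest⟩ := h
    have hne : cur ≠ k := by
      intro hEq
      rw [PySem.Dict.contains_eq_isSome_get?, ← hEq, hp] at hk
      simp at hk
    exact ⟨parent, (PySem.Dict.get?_insert_of_ne _ _ hne).trans hp, ih parent hrest⟩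

lemma chainRev_rebuild (pred : PySem.Dict String (Option (String × String))) :
    ∀ (l : List String) (cur : String) (fuel : Nat) (rels : List String),
    ChainRev pred cur l → l.length ≤ fuel →
    rebuild pred fuel cur rels = (rels ++ l).reverse := by
  intro l
  induction l with
  | nil =>
    intro cur fuel rels h _
    have hget : pred.getD cur none = none := by
      rw [PySem.Dict.getD_eq_get?_getD, h]; rfl
    cases fuel with
    | zero => simp [rebuild]
    | succ f => simp [rebuild, hget]
  | cons rel rest ih =>
    intro cur fuel rels h hfuel
    obtain ⟨parent, hp, hrest⟩ := h
    have hget : pred.getD cur none = some (parent, rel) := by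
      rw [PySem.Dict.getD_eq_get?_getD, hp]; rfl
    cases fuel with
    | zero => simp at hfuel
    | succ f =>
      simp only [rebuild, hget]
      rw [ih parent f (rels ++ [rel]) hrest (by simpa using hfuel)]
      simp

-- the coupling invariant between a full-path state and a parent-pointer state
def InvPB (paths : PySem.Dict String (List String))
    (pred : PySem.Dict String (Option (String × String))) : Prop :=
  paths.items.map Prod.fst = pred.items.map Prod.fst ∧
  ∀ kv ∈ paths.items, ChainRev pred kv.1 kv.2.reverse ∧ kv.2.length ≤ paths.items.length

lemma inv_contains_eq (paths : PySem.Dict String (List String))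
    (pred : PySem.Dict String (Option (String × String)))
    (h : paths.items.map Prod.fst = pred.items.map Prod.fst) (k : String) :
    paths.contains k = pred.contains k := by
  rw [PySem.Dict.contains_eq_decide_mem_keys, PySem.Dict.contains_eq_decide_mem_keys]
  show decide (k ∈ paths.items.map Prod.fst) = decide (k ∈ pred.items.map Prod.fst)
  rw [h]

-- one inner fold over the adjacency entries of `current` preserves the coupling
lemma foldStep_couple (current : String) (path : List String) :
    ∀ (entries : List (String × String))
      (paths : PySem.Dict String (List String))
      (pred : PySem.Dict String (Option (String × String))) (acc : List String),
    InvPB paths pred → ChainRev pred current path.reverse →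
    path.length ≤ paths.items.length →
    InvPB (entries.foldl (stepB path) (paths, acc)).1
        (entries.foldl (stepP current) (pred, acc)).1 ∧
    (entries.foldl (stepB path) (paths, acc)).2
      = (entries.foldl (stepP current) (pred, acc)).2 ∧
    ChainRev (entries.foldl (stepP current) (pred, acc)).1 current path.reverse ∧
    paths.items.length ≤ (entries.foldl (stepB path) (paths, acc)).1.items.length := by
  intro entries
  induction entries with
  | nil => intro paths pred acc hI hC hL; exact ⟨hI, rfl, hC, le_refl _⟩
  | cons e rest ih =>
    intro paths pred acc hI hC hL
    obtain ⟨hkeys, hitems⟩ := hI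
    have hcont := inv_contains_eq paths pred hkeys e.2
    by_cases hc : pred.contains e.2
    · simp only [List.foldl_cons, stepB, stepP, hcont, hc, if_true]
      exact ih paths pred acc ⟨hkeys, hitems⟩ hC hL
    · have hcB : paths.contains e.2 = false := by rw [hcont]; simpa using hc
      have hcP : pred.contains e.2 = false := by simpa using hc
      simp only [List.foldl_cons, stepB, stepP, hcont, hcP, if_false,
        Bool.false_eq_true]
      have hitemsB := PySem.Dict.items_insert_of_not_contains
        (d := paths) (v := path ++ [e.1]) hcB
      have hitemsP := PySem.Dict.items_insert_of_not_contains
        (d := pred) (v := some (current, e.1)) hcP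
      have hC' : ChainRev (pred.insert e.2 (some (current, e.1))) current path.reverse :=
        chainRev_insert pred e.2 _ hcP _ current hC
      refine (ih _ _ _ ⟨?_, ?_⟩ hC' ?_).imp id (fun h => h.imp id (fun h => h.imp id ?_))
      · rw [hitemsB, hitemsP]
        simp [hkeys]
      · intro kv hkv
        rw [hitemsB] at hkv
        rcases List.mem_append.1 hkv with hkv | hkv
        · obtain ⟨hch, hlen⟩ := hitems kv hkv
          refine ⟨chainRev_insert pred e.2 _ hcP _ _ hch, ?_⟩
          rw [hitemsB]
          simp only [List.length_append, List.length_singleton]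
          omega
        · rw [List.mem_singleton] at hkv
          subst hkv
          constructor
          · show ChainRev _ e.2 (path ++ [e.1]).reverse
            rw [List.reverse_append, List.reverse_singleton, List.singleton_append]
            exact ⟨current, PySem.Dict.get?_insert_self _ _ _, hC'⟩
          · rw [hitemsB]
            simp only [List.length_append, List.length_singleton]
            omega
      · rw [hitemsB]
        simp only [List.length_append, List.length_singleton]
        omega
      · intro h
        rw [hitemsB] at h
        simp only [List.length_append, List.length_singleton] at h
        omega

-- a level pass preserves the coupling and produces the same next frontier
lemma level_couple (adj : PySem.Dict String (List (String × String))) :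
    ∀ (F : List String) (paths : PySem.Dict String (List String))
      (pred : PySem.Dict String (Option (String × String))) (acc : List String),
    InvPB paths pred → (∀ f ∈ F, (paths.get? f).isSome) →
    InvPB (levelB adj (paths, acc) F).1 (levelP adj (pred, acc) F).1 ∧
    (levelB adj (paths, acc) F).2 = (levelP adj (pred, acc) F).2 := by
  intro F
  induction F with
  | nil => intro paths pred acc hI _; exact ⟨hI, rfl⟩
  | cons f F' ih =>
    intro paths pred acc hI hF
    have hsome : (paths.get? f).isSome := hF f (by simp)
    rcases hp : paths.get? f with _ | p
    · rw [hp] at hsome; simp at hsome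
    have hpath : paths.getD f [] = p := by
      rw [PySem.Dict.getD_eq_get?_getD, hp]; rfl
    have hmem : (f, p) ∈ paths.items := PySem.Dict.mem_items_of_get?_eq_some _ hp
    obtain ⟨hch, hlen⟩ := hI.2 (f, p) hmem
    have hcouple := foldStep_couple f p (adj.getD f []) paths pred acc hI hch hlen
    obtain ⟨hI', hacc', _, _⟩ := hcouple
    have hstepB : levelB adj (paths, acc) (f :: F')
        = levelB adj ((adj.getD f []).foldl (stepB p) (paths, acc)) F' := by
      show levelB adj ((adj.getD f []).foldl (stepB ((paths, acc).1.getD f [])) (paths, acc)) F'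
        = _
      rw [show (paths, acc).1.getD f [] = p from hpath]
    have hstepP : levelP adj (pred, acc) (f :: F')
        = levelP adj ((adj.getD f []).foldl (stepP f) (pred, acc)) F' := rfl
    rw [hstepB, hstepP]
    have hF' : ∀ g ∈ F', (((adj.getD f []).foldl (stepB p) (paths, acc)).1.get? g).isSome := by
      intro g hg
      have hgs : (paths.get? g).isSome := hF g (by simp [hg])
      rw [foldStepB_get?_pres p (adj.getD f []) (paths, acc) g hgs]
      exact hgs
    have hy : ((List.foldl (stepP f) (pred, acc) (adj.getD f [])).1,
        (List.foldl (stepB p) (paths, acc) (adj.getD f [])).2)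
        = List.foldl (stepP f) (pred, acc) (adj.getD f []) := by
      rw [hacc']
    rw [← hy]
    exact ih _ _ _ hI' hF' 

-- nodes of the next frontier are keys of the new paths dict
lemma foldStepB_next_some (path : List String) :
    ∀ (entries : List (String × String)) (st : _),
    (∀ n ∈ st.2, (st.1.get? n).isSome) →
    ∀ n ∈ (entries.foldl (stepB path) st).2,
      ((entries.foldl (stepB path) st).1.get? n).isSome := by
  intro entries
  induction entries with
  | nil => intro st h n hn; exact h n hn
  | cons e rest ih =>
    intro st h n hn
    by_cases hc : st.1.contains e.2
    · simp only [List.foldl_cons, stepB, hc, if_true] at hn ⊢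
      exact ih st h n hn
    · simp only [List.foldl_cons, stepB, hc, if_false, Bool.false_eq_true] at hn ⊢
      refine ih _ ?_ n hn
      intro m hm
      rcases List.mem_append.1 hm with hm | hm
      · have hms := h m hm
        have hne : m ≠ e.2 := by
          intro hEq
          rw [hEq, ← PySem.Dict.contains_eq_isSome_get?] at hms
          exact hc hms
        rw [PySem.Dict.get?_insert_of_ne _ _ hne]
        exact hms
      · rw [List.mem_singleton] at hm
        subst hm
        rw [PySem.Dict.get?_insert_self]
        rfl

lemma level_next_some (adj : PySem.Dict String (List (String × String))) :
    ∀ (F : List String) (paths : PySem.Dict String (List String)) (acc : List String),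
    (∀ f ∈ F, (paths.get? f).isSome) →
    (∀ n ∈ acc, (paths.get? n).isSome) →
    ∀ g ∈ (levelB adj (paths, acc) F).2, ((levelB adj (paths, acc) F).1.get? g).isSome := by
  intro F
  induction F with
  | nil => intro paths acc _ hacc g hg; exact hacc g hg
  | cons f F' ih =>
    intro paths acc hF hacc g hg
    have hstep : levelB adj (paths, acc) (f :: F')
        = levelB adj ((adj.getD f []).foldl (stepB (paths.getD f [])) (paths, acc)) F' := rfl
    rw [hstep] at hg ⊢
    have h1 : ∀ f' ∈ F',
        ((((adj.getD f []).foldl (stepB (paths.getD f [])) (paths, acc))).1.get? f').isSome := by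
      intro f' hf'
      rw [foldStepB_get?_pres _ _ _ f' (hF f' (by simp [hf']))]
      exact hF f' (by simp [hf'])
    have h2 : ∀ n ∈ (((adj.getD f []).foldl (stepB (paths.getD f [])) (paths, acc))).2,
        ((((adj.getD f []).foldl (stepB (paths.getD f [])) (paths, acc))).1.get? n).isSome :=
      foldStepB_next_some _ _ (paths, acc) hacc
    exact ih _ _ h1 h2 g hg

-- the two outer hop loops stay coupled
lemma loop_couple (adj : PySem.Dict String (List (String × String))) :
    ∀ (k : Nat) (F : List String) (paths : PySem.Dict String (List String))
      (pred : PySem.Dict String (Option (String × String))),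
    InvPB paths pred → (∀ f ∈ F, (paths.get? f).isSome) →
    InvPB (loopB adj paths F k) (loopP adj pred F k) := by
  intro k
  induction k with
  | zero => intro F paths pred hI _; exact hI
  | succ k ih =>
    intro F paths pred hI hF
    by_cases hFe : F.isEmpty
    · simp only [loopB, loopP, hFe, if_true]
      exact hI
    · simp only [loopB, loopP, hFe, if_false, Bool.false_eq_true]
      obtain ⟨hI', hfr⟩ := level_couple adj F paths pred [] hI hF
      rw [← hfr]
      refine ih _ _ _ hI' ?_
      -- every node of the produced frontier is a key of the new paths dict
      intro g hg
      exact level_next_some adj F paths [] hF (by intro n hn; simp at hn) g hg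

-- final reconstruction: a coupled pair of final states yields equal item lists
lemma inv_items_eq (paths : PySem.Dict String (List String))
    (pred : PySem.Dict String (Option (String × String))) (hI : InvPB paths pred) :
    paths.items = pred.items.map (fun kv => (kv.1, rebuild pred pred.items.length kv.1 [])) := by
  obtain ⟨hkeys, hitems⟩ := hI
  have hlen : paths.items.length = pred.items.length := by
    have := congrArg List.length hkeys
    simpa using this
  apply List.ext_getElem
  · simpa using hlen
  · intro i h1 h2
    have hi2 : i < pred.items.length := by simpa using h2
    have hkey : (paths.items[i]'h1).1 = (pred.items[i]'hi2).1 := by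
      have := congrArg (fun l => l[i]?) hkeys
      simp only [List.getElem?_map] at this
      rw [List.getElem?_eq_getElem h1, List.getElem?_eq_getElem hi2] at this
      simpa using this
    obtain ⟨hch, hl⟩ := hitems (paths.items[i]'h1) (List.getElem_mem h1)
    have hreb : rebuild pred pred.items.length (paths.items[i]'h1).1 []
        = (paths.items[i]'h1).2 := by
      rw [chainRev_rebuild pred _ _ _ _ hch (by simpa [hlen] using hl)]
      simp
    simp only [List.getElem_map]
    rw [← hkey, hreb]

-- ===== VERDICT (by name: the statement is the Claim_ definition above) =====
theorem shortest_paths_spec : Claim_equal_shortest_paths := by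
  intro adjacency start max_hops _
  unfold Spec_shortest_paths shortest_paths shortest_paths_alt
  rw [runA_eq_loopB _ max_hops max_hops.toNat 0 [start] _
    (by
      intro f hf
      rw [List.mem_singleton] at hf
      subst hf
      exact ⟨[], PySem.Dict.get?_insert_self _ _ _, rfl⟩)
    (by simp)]
  apply inv_items_eq
  apply loop_couple
  · constructor
    · rw [PySem.Dict.items_insert_of_not_contains _ _ (by simp),
        PySem.Dict.items_insert_of_not_contains _ _ (by simp)]
      rfl
    · intro kv hkv
      rw [PySem.Dict.items_insert_of_not_contains _ _ (by simp)] at hkv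
      have hkv' : kv = (start, []) := by simpa [PySem.Dict.empty, PySem.Dict.items] using hkv
      subst hkv' 
      refine ⟨?_, by simp⟩
      show ChainRev _ start (([] : List String)).reverse
      show PySem.Dict.get? _ start = some none
      exact PySem.Dict.get?_insert_self _ _ _
  · intro f hf
    rw [List.mem_singleton] at hf
    subst hf
    rw [PySem.Dict.get?_insert_self]
    rfl
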